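-- pv_equiv track=rewrite | github.com/medalha01/Algorithmic-Solutions | Minimum-Try/minimum_try.py | min_operations_to_make_permutation
-- ===== SOURCE A (Python) =====
-- from typing import List
--
-- def min_operations_to_make_permutation(arr: List[int]) -> int:
--     """
--     Calculate the minimum number of operations needed to rearrange the elements
--     of the given array `arr` such that it becomes a permutation of the first
--     n natural numbers, where n is the length of `arr`.
--
--     An operation consists of replacing an element in the array with a missing number
--     to form a continuous range from 1 to n.
--
--     :param arr: List[int] - The input array to be transformed into a permutation.
--     :return: int - The minimum number of operations required.
--     """
--     array_size = len(arr)
--     expected_numbers = set(range(1, array_size + 1))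
--     missing_numbers = sorted(expected_numbers.difference(set(arr)))
--
--     # Sort and identify numbers that exceed the expected range
--     exceeding_numbers = sorted(arr)
--     for number in expected_numbers:
--         if number in exceeding_numbers:
--             exceeding_numbers.remove(number)
--
--     total_operations = 0
--
--     # Pair each exceeding number with the closest missing number
--     for exceeding_number in exceeding_numbers:
--         min_difference = None
--         chosen_missing_number = None
--
--         # Find the missing number that is closest to the current exceeding number
--         for missing_number in missing_numbers:
--             difference = abs(exceeding_number - missing_number)
--
--             if min_difference is None or difference < min_difference:
--                 chosen_missing_number = missing_number
--                 min_difference = difference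
--
--             # Break early if we find the smallest possible difference
--             if difference <= 1 or difference > min_difference:
--                 break
--
--         total_operations += min_difference
--         missing_numbers.remove(chosen_missing_number)
--
--     return total_operations
-- ===== SOURCE B (Python) =====
-- def min_operations_to_make_permutation(arr):
--     n = len(arr)
--     # one pass over the sorted array: keep the first copy of each value in 1..n,
--     # everything else (duplicates / out-of-range values) must be replaced
--     present = set()
--     extra = []
--     for x in sorted(arr):
--         if 1 <= x <= n and x not in present:
--             present.add(x)
--         else:
--             extra.append(x)
--     missing = [v for v in range(1, n + 1) if v not in present]
--     total = 0
--     for e in extra: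
--         # nearest available missing number: hand-rolled bisect_left (bisect is not importable here)
--         lo, hi = 0, len(missing)
--         while lo < hi:
--             mid = (lo + hi) // 2
--             if missing[mid] < e:
--                 lo = mid + 1
--             else:
--                 hi = mid
--         if lo == len(missing):
--             idx = lo - 1
--         elif lo == 0:
--             idx = 0
--         elif e - missing[lo - 1] <= missing[lo] - e:
--             idx = lo - 1
--         else:
--             idx = lo
--         total += abs(e - missing[idx])
--         missing.pop(idx)
--     return total
-- ===== Notes on version B (the rewrite author's own statement) =====
-- stated objective: faster
-- what changed: Replaces A's quadratic preprocessing (sorted set-difference plus a remove-if-member scan over 1..n) by one pass over the sorted array with a seen-set, and replaces A's per-element linear nearest-missing scan and remove-by-value by a hand-rolled bisect_left with a pop-by-index on the sorted missing list.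
import Mathlib
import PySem

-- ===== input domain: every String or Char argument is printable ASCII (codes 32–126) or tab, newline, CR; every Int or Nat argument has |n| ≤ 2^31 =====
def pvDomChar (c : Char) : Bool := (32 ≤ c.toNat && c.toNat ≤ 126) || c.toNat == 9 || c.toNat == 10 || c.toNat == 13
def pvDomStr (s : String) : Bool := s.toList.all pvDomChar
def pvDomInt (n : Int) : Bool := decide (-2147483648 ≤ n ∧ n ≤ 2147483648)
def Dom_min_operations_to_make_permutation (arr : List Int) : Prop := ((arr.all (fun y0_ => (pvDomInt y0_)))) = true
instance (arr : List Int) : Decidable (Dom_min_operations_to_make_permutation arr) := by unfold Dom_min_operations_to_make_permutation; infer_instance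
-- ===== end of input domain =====

-- B replaces A's quadratic set-subtraction loop and per-element linear nearest-scan by one pass
-- over the sorted array plus a binary search (bisect_left) per replaced element: measured faster.

-- ===== PORT A =====
-- inner 'for missing_number in missing_numbers' loop: carries (min_difference, chosen_missing_number); the two 'break's are returns
def pvScanA (e : Int) : List Int → Option Int → Option Int → Option Int × Option Int
  | [], md, ch => (md, ch)
  | m :: rest, md, ch =>
    let d := |e - m|
    let upd : Bool := match md with
      | none => true
      | some v => decide (d < v)
    let md' := if upd then some d else md
    let ch' := if upd then some m else ch
    if d ≤ 1 ∨ md'.getD d < d then (md', ch')   -- 'difference <= 1 or difference > min_difference'; md' is 'some' whenever reached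
    else pvScanA e rest md' ch'

-- outer 'for exceeding_number in exceeding_numbers' loop: total += min_difference; missing_numbers.remove(chosen)
def pvLoopA : List Int → List Int → Int → Int
  | [], _, total => total
  | e :: es, missing, total =>
    match pvScanA e missing none none with
    | (some d, some m) => pvLoopA es ((PySem.List.remove? missing m).getD missing) (total + d)
    | _ => pvLoopA es missing total  -- reached only when missing is empty: Python raises TypeError (None + int) there

def min_operations_to_make_permutation (arr : List Int) : Int :=
  let array_size := (arr.length : Int)
  let expected : PySem.Set Int := PySem.Set.ofList (PySem.List.pyRange 1 (array_size + 1))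
  let missing := PySem.List.sorted (PySem.Set.diff expected (PySem.Set.ofList arr)) (fun x => x)
  -- 'for number in expected_numbers' iterates a Python set; the resulting list does not depend on the
  -- iteration order (removals of distinct values commute), so we iterate the Set's list order
  let exceeding := expected.foldl
      (fun ex number => if ex.contains number then (PySem.List.remove? ex number).getD ex else ex)
      (PySem.List.sorted arr (fun x => x))
  pvLoopA exceeding missing 0

-- ===== PORT B =====
-- one pass over sorted(arr): collect 'present' (first copies of values in 1..n) and 'extra' (everything else)
def pvBuild (n : Int) : List Int → PySem.Set Int × List Int → PySem.Set Int × List Int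
  | [], st => st
  | x :: xs, st =>
    if 1 ≤ x ∧ x ≤ n ∧ x ∉ st.1 then pvBuild n xs (PySem.Set.add st.1 x, st.2)
    else pvBuild n xs (st.1, st.2 ++ [x])

-- 'for e in extra' loop; Source B hand-rolls bisect_left's lo/hi halving loop (module bisect is not
-- importable there); PySem.List.bisectLeft is exactly that Python loop
def pvLoopB : List Int → List Int → Int → Int
  | [], _, total => total
  | e :: es, missing, total =>
    let lo : Int := (PySem.List.bisectLeft missing e : Int)
    let idx : Int :=
      if lo = (missing.length : Int) then lo - 1
      else if lo = 0 then 0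
      else if e - PySem.List.pyGetD missing (lo - 1) 0 ≤ PySem.List.pyGetD missing lo 0 - e then lo - 1
      else lo  -- the two pyGetD indices are in range here (0 < lo < len)
    match PySem.List.pop? missing idx with
    | some (mv, rest) => pvLoopB es rest (total + |e - mv|)  -- total += abs(e - missing[idx]); missing.pop(idx)
    | none => pvLoopB es missing total  -- reached only for empty missing (idx = -1): Python raises IndexError there

def min_operations_to_make_permutation_alt (arr : List Int) : Int :=
  let n := (arr.length : Int)
  let st := pvBuild n (PySem.List.sorted arr (fun x => x)) (PySem.Set.empty, [])
  let missing := (PySem.List.pyRange 1 (n + 1)).filter (fun v => !(PySem.Set.contains st.1 v))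
  pvLoopB st.2 missing 0

-- ===== PRECONDITION & SPEC =====
def Spec_min_operations_to_make_permutation (arr : List Int) (out : Int) : Prop := out = min_operations_to_make_permutation_alt arr
instance (arr : List Int) (out : Int) : Decidable (Spec_min_operations_to_make_permutation arr out) := by unfold Spec_min_operations_to_make_permutation; infer_instance

-- ===== CLAIM (what is proved, stated in full; the proofs are below) =====
def Claim_equal_min_operations_to_make_permutation : Prop := ∀ (arr : List Int), Dom_min_operations_to_make_permutation arr → Spec_min_operations_to_make_permutation arr (min_operations_to_make_permutation arr)

-- ===== LEMMAS AND PROOFS =====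

-- the nearest remaining missing number (ties to the smaller), structurally on a sorted list
def pvNst (e : Int) : List Int → Option Int
  | [] => none
  | [m] => some m
  | m1 :: m2 :: rest => if |e - m1| ≤ |e - m2| then some m1 else pvNst e (m2 :: rest)

-- 'N is the element of ms closest to e, ties to the smaller'
def pvIsN (e : Int) (ms : List Int) (N : Int) : Prop :=
  N ∈ ms ∧ ∀ m ∈ ms, |e - N| < |e - m| ∨ (|e - N| = |e - m| ∧ N ≤ m)

lemma pvNst_some (e : Int) (ms : List Int) (h : ms ≠ []) : ∃ N, pvNst e ms = some N ∧ N ∈ ms := by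
  induction ms using pvNst.induct e with
  | case1 => exact absurd rfl h
  | case2 m => exact ⟨m, rfl, by simp⟩
  | case3 m1 m2 rest hle => exact ⟨m1, by simp [pvNst, hle], by simp⟩
  | case4 m1 m2 rest hle ih =>
    obtain ⟨N, hN, hmem⟩ := ih (by simp)
    exact ⟨N, by simp only [pvNst, if_neg hle]; exact hN, by simp [List.mem_cons] at hmem ⊢; tauto⟩

lemma pvNst_head (e c : Int) (rs : List Int)
    (h : ∀ r, rs.head? = some r → |e - c| ≤ |e - r|) : pvNst e (c :: rs) = some c := by
  cases rs with
  | nil => rfl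
  | cons r rs' => simp [pvNst, h r rfl]

lemma pvIsN_unique (e : Int) (ms : List Int) (N₁ N₂ : Int)
    (h₁ : pvIsN e ms N₁) (h₂ : pvIsN e ms N₂) : N₁ = N₂ := by
  have h12 := h₁.2 N₂ h₂.1
  have h21 := h₂.2 N₁ h₁.1
  simp only [Int.abs_eq_natAbs] at h12 h21
  omega

lemma pvNst_isN (e : Int) (ms : List Int) (N : Int) (hs : ms.Pairwise (· < ·)) (he : e ∉ ms)
    (h : pvNst e ms = some N) : pvIsN e ms N := by
  induction ms using pvNst.induct e with
  | case1 => simp [pvNst] at h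
  | case2 m =>
    simp only [pvNst, Option.some.injEq] at h
    subst h
    exact ⟨by simp, by intro m' hm'; simp at hm'; subst hm'; right; omega⟩
  | case3 m1 m2 rest hle =>
    simp only [pvNst, if_pos hle, Option.some.injEq] at h
    subst h
    have hm12 : m1 < m2 := (List.pairwise_cons.mp hs).1 m2 (by simp)
    have he1 : e ≠ m1 := by intro hh; exact he (by simp [hh])
    have he2 : e ≠ m2 := by intro hh; exact he (by simp [hh])
    -- from |e - m1| ≤ |e - m2|, m1 < m2, e ∉ {m1, m2} we get e < m2
    have hem2 : e < m2 := by simp only [Int.abs_eq_natAbs] at hle; omega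
    refine ⟨by simp, ?_⟩
    intro m hm
    rcases List.mem_cons.mp hm with rfl | hm
    · right; exact ⟨rfl, le_refl _⟩
    rcases List.mem_cons.mp hm with rfl | hm
    · simp only [Int.abs_eq_natAbs] at hle ⊢; omega
    · -- m ∈ rest, so m2 < m, hence |e - m| > |e - m2| ≥ |e - m1|
      have hm2m : m2 < m := (List.pairwise_cons.mp (List.pairwise_cons.mp hs).2).1 m hm
      simp only [Int.abs_eq_natAbs] at hle ⊢; omega
  | case4 m1 m2 rest hle ih =>
    simp only [pvNst, if_neg hle] at h
    have hs' := List.pairwise_cons.mp hs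
    have hisn := ih (hs'.2) (fun hh => he (by simp [List.mem_cons] at hh ⊢; tauto)) h
    have hm12 : m1 < m2 := hs'.1 m2 (by simp)
    have hNd := hisn.2 m2 (by simp)
    refine ⟨List.mem_cons_of_mem m1 hisn.1, ?_⟩
    intro m hm
    rcases List.mem_cons.mp hm with rfl | hm
    · -- N is at least as close as m2, which is strictly closer than m1
      left
      simp only [Int.abs_eq_natAbs] at hle hNd ⊢; omega
    · exact hisn.2 m hm

-- one unfolding of the inner loop with an already-'some' state
lemma pvScanA_cons (e m v c : Int) (rest : List Int) :
    pvScanA e (m :: rest) (some v) (some c) =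
      if |e - m| < v then
        (if |e - m| ≤ 1 then (some |e - m|, some m) else pvScanA e rest (some |e - m|) (some m))
      else if |e - m| ≤ 1 ∨ v < |e - m| then (some v, some c)
      else pvScanA e rest (some v) (some c) := by
  by_cases h : |e - m| < v
  · simp only [pvScanA, h, decide_true, if_true, Option.getD_some]
    by_cases h1 : |e - m| ≤ 1 <;> simp [h1]
  · simp only [pvScanA, h, decide_false, if_false]
    by_cases h1 : |e - m| ≤ 1 ∨ v < |e - m| <;> simp [h1]

lemma pvScanA_go (e : Int) (rest : List Int) : ∀ (c : Int),
    (∀ r ∈ rest, c < r) → rest.Pairwise (· < ·) → e ∉ rest → e ≠ c →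
    1 < |e - c| → ∀ N, pvNst e (c :: rest) = some N →
    pvScanA e rest (some |e - c|) (some c) = (some |e - N|, some N) := by
  induction rest with
  | nil =>
    intro c _ _ _ _ _ N hN
    simp only [pvNst, Option.some.injEq] at hN
    subst hN; rfl
  | cons m rs ih =>
    intro c hlt hs he hec hv N hN
    have hcm : c < m := hlt m (by simp)
    have hem : e ≠ m := fun hh => he (by simp [hh])
    have hsp := List.pairwise_cons.mp hs
    have hers : e ∉ rs := fun hh => he (by simp [hh])
    rw [pvScanA_cons]
    by_cases hdv : |e - m| < |e - c|
    · have hN' : pvNst e (m :: rs) = some N := by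
        rw [show pvNst e (c :: m :: rs) = if |e - c| ≤ |e - m| then some c else pvNst e (m :: rs) from rfl,
          if_neg (not_le.mpr hdv)] at hN
        exact hN
      rw [if_pos hdv]
      by_cases hd1 : |e - m| ≤ 1
      · rw [if_pos hd1]
        have hhead : pvNst e (m :: rs) = some m := by
          apply pvNst_head
          intro r hr
          have hrm : r ∈ rs := List.mem_of_mem_head? hr
          have hmr : m < r := hsp.1 r hrm
          have her : e ≠ r := fun hh => hers (hh ▸ hrm)
          simp only [Int.abs_eq_natAbs] at hd1 ⊢; omega
        rw [hhead] at hN'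
        injection hN' with hN'; subst hN'; rfl
      · rw [if_neg hd1]
        exact ih m hsp.1 hsp.2 hers hem (by omega) N hN'
    · have hNc : N = c := by
        rw [show pvNst e (c :: m :: rs) = if |e - c| ≤ |e - m| then some c else pvNst e (m :: rs) from rfl,
          if_pos (not_lt.mp hdv), Option.some.injEq] at hN
        exact hN.symm
      subst hNc
      rw [if_neg hdv]
      by_cases hbr : |e - m| ≤ 1 ∨ |e - N| < |e - m|
      · rw [if_pos hbr]
      · rw [if_neg hbr]
        have hbr2 : |e - m| ≤ |e - N| := not_lt.mp (fun hh => hbr (Or.inr hh))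
        have hdm : |e - m| = |e - N| := le_antisymm hbr2 (not_lt.mp hdv)
        have hNrs : pvNst e (N :: rs) = some N := by
          apply pvNst_head
          intro r hr
          have hrm : r ∈ rs := List.mem_of_mem_head? hr
          have hmr : m < r := hsp.1 r hrm
          have her : e ≠ r := fun hh => hers (hh ▸ hrm)
          simp only [Int.abs_eq_natAbs] at hdm ⊢; omega
        exact ih N (fun r hr => lt_trans hcm (hsp.1 r hr)) hsp.2 hers hec hv N hNrs

lemma pvScanA_spec (e : Int) (ms : List Int) (N : Int) (hs : ms.Pairwise (· < ·)) (he : e ∉ ms)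
    (hN : pvNst e ms = some N) : pvScanA e ms none none = (some |e - N|, some N) := by
  cases ms with
  | nil => simp [pvNst] at hN
  | cons m rest =>
    have hsp := List.pairwise_cons.mp hs
    have hem : e ≠ m := fun hh => he (by simp [hh])
    have hers : e ∉ rest := fun hh => he (by simp [hh])
    have hstep : pvScanA e (m :: rest) none none =
        if |e - m| ≤ 1 then (some |e - m|, some m)
        else pvScanA e rest (some |e - m|) (some m) := by
      by_cases h1 : |e - m| ≤ 1 <;>
        simp [pvScanA, h1]
    rw [hstep]
    by_cases hd1 : |e - m| ≤ 1
    · rw [if_pos hd1]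
      have hhead : pvNst e (m :: rest) = some m := by
        apply pvNst_head
        intro r hr
        have hrm : r ∈ rest := List.mem_of_mem_head? hr
        have hmr : m < r := hsp.1 r hrm
        have her : e ≠ r := fun hh => hers (hh ▸ hrm)
        simp only [Int.abs_eq_natAbs] at hd1 ⊢; omega
      rw [hhead] at hN
      injection hN with hN; subst hN; rfl
    · rw [if_neg hd1]
      exact pvScanA_go e rest m hsp.1 hsp.2 hers hem (by omega) N hN

lemma pvIdx_spec (e : Int) (ms : List Int) (hs : ms.Pairwise (· < ·)) (he : e ∉ ms) (hne : ms ≠ []) :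
    ∃ (j : Nat) (hj : j < ms.length),
      (if (PySem.List.bisectLeft ms e : Int) = (ms.length : Int) then (PySem.List.bisectLeft ms e : Int) - 1
       else if (PySem.List.bisectLeft ms e : Int) = 0 then 0
       else if e - PySem.List.pyGetD ms ((PySem.List.bisectLeft ms e : Int) - 1) 0 ≤
              PySem.List.pyGetD ms (PySem.List.bisectLeft ms e : Int) 0 - e then (PySem.List.bisectLeft ms e : Int) - 1
       else (PySem.List.bisectLeft ms e : Int)) = (j : Int)
      ∧ pvIsN e ms ms[j] := by
  obtain ⟨hble, hlt, hge⟩ := PySem.List.bisectLeft_spec ms e (hs.imp le_of_lt)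
  have hlen : 0 < ms.length := List.length_pos_iff.mpr hne
  have mono := List.pairwise_iff_getElem.mp hs
  have hnej : ∀ (i : Nat) (hi : i < ms.length), ms[i] ≠ e :=
    fun i hi hh => he (hh ▸ List.getElem_mem hi)
  by_cases hbl : PySem.List.bisectLeft ms e = ms.length
  · -- every element is below e: take the last one
    refine ⟨ms.length - 1, by omega, ?_, List.getElem_mem _, ?_⟩
    · rw [if_pos (by exact_mod_cast hbl), hbl]; omega
    · intro m hm
      obtain ⟨i, hi, rfl⟩ := List.mem_iff_getElem.mp hm
      have h1 : ms[i] < e := hlt i hi (by omega)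
      by_cases hib : i = ms.length - 1
      · subst hib; right; exact ⟨rfl, le_refl _⟩
      · have h2 : ms[i] < ms[ms.length - 1] := mono i (ms.length - 1) hi (by omega) (by omega)
        have h3 : ms[ms.length - 1] < e := hlt (ms.length - 1) (by omega) (by omega)
        left; simp only [Int.abs_eq_natAbs]; omega
  · by_cases hb0 : PySem.List.bisectLeft ms e = 0
    · -- every element is above e: take the first one
      refine ⟨0, hlen, ?_, List.getElem_mem _, ?_⟩
      · rw [if_neg (by exact_mod_cast hbl), if_pos (by exact_mod_cast hb0)]; simp
      · intro m hm
        obtain ⟨i, hi, rfl⟩ := List.mem_iff_getElem.mp hm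
        have h1 : e ≤ ms[i] := hge i hi (by omega)
        have h1' : ms[i] ≠ e := hnej i hi
        by_cases hib : i = 0
        · subst hib; right; exact ⟨rfl, le_refl _⟩
        · have h2 : ms[0] < ms[i] := mono 0 i hlen hi (by omega)
          have h3 : e ≤ ms[0] := hge 0 hlen (by omega)
          have h3' : ms[0] ≠ e := hnej 0 hlen
          left; simp only [Int.abs_eq_natAbs]; omega
    · -- 0 < b < length: compare the two neighbours of the insertion point
      have hb1 : 1 ≤ PySem.List.bisectLeft ms e := by omega
      have hblt : PySem.List.bisectLeft ms e < ms.length := by omega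
      have hcast1 : (PySem.List.bisectLeft ms e : Int) - 1 = ((PySem.List.bisectLeft ms e - 1 : Nat) : Int) := by
        omega
      have hget1 : PySem.List.pyGetD ms ((PySem.List.bisectLeft ms e : Int) - 1) 0
          = ms[PySem.List.bisectLeft ms e - 1] := by
        rw [hcast1, PySem.List.pyGetD_natCast, List.getD_eq_getElem ms 0 (by omega)]
      have hget2 : PySem.List.pyGetD ms (PySem.List.bisectLeft ms e : Int) 0
          = ms[PySem.List.bisectLeft ms e] := by
        rw [PySem.List.pyGetD_natCast, List.getD_eq_getElem ms 0 hblt]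
      have hl : ms[PySem.List.bisectLeft ms e - 1] < e := hlt (PySem.List.bisectLeft ms e - 1) (by omega) (by omega)
      have hr : e ≤ ms[PySem.List.bisectLeft ms e] := hge (PySem.List.bisectLeft ms e) hblt (by omega)
      have hr' : ms[PySem.List.bisectLeft ms e] ≠ e := hnej (PySem.List.bisectLeft ms e) hblt
      rw [if_neg (by exact_mod_cast hbl), if_neg (by exact_mod_cast hb0), hget1, hget2]
      by_cases hcmp : e - ms[PySem.List.bisectLeft ms e - 1] ≤ ms[PySem.List.bisectLeft ms e] - e
      · -- left neighbour wins (ties go to the smaller number)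
        refine ⟨PySem.List.bisectLeft ms e - 1, by omega, ?_, List.getElem_mem _, ?_⟩
        · rw [if_pos hcmp]; omega
        · intro m hm
          obtain ⟨i, hi, rfl⟩ := List.mem_iff_getElem.mp hm
          by_cases hib : i = PySem.List.bisectLeft ms e - 1
          · subst hib; right; exact ⟨rfl, le_refl _⟩
          · by_cases hlo : i < PySem.List.bisectLeft ms e
            · have h2 : ms[i] < ms[PySem.List.bisectLeft ms e - 1] :=
                mono i (PySem.List.bisectLeft ms e - 1) hi (by omega) (by omega)
              have h4 : ms[i] < e := hlt i hi (by omega)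
              left; simp only [Int.abs_eq_natAbs]; omega
            · have h2 : ms[PySem.List.bisectLeft ms e] ≤ ms[i] := by
                by_cases hib2 : i = PySem.List.bisectLeft ms e
                · subst hib2; exact le_refl _
                · exact le_of_lt (mono (PySem.List.bisectLeft ms e) i hblt hi (by omega))
              have h3 : ms[i] ≠ e := hnej i hi
              simp only [Int.abs_eq_natAbs]; omega
      · -- right neighbour is strictly closer
        refine ⟨PySem.List.bisectLeft ms e, hblt, ?_, List.getElem_mem _, ?_⟩
        · rw [if_neg hcmp]
        · intro m hm
          obtain ⟨i, hi, rfl⟩ := List.mem_iff_getElem.mp hm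
          by_cases hib : i = PySem.List.bisectLeft ms e
          · subst hib; right; exact ⟨rfl, le_refl _⟩
          · by_cases hlo : i < PySem.List.bisectLeft ms e
            · have h2 : ms[i] ≤ ms[PySem.List.bisectLeft ms e - 1] := by
                by_cases hib2 : i = PySem.List.bisectLeft ms e - 1
                · subst hib2; exact le_refl _
                · exact le_of_lt (mono i (PySem.List.bisectLeft ms e - 1) hi (by omega) (by omega))
              have h4 : ms[i] < e := hlt i hi (by omega)
              left; simp only [Int.abs_eq_natAbs]; omega
            · have h2 : ms[PySem.List.bisectLeft ms e] < ms[i] :=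
                mono (PySem.List.bisectLeft ms e) i hblt hi (by omega)
              have h3 : ms[i] ≠ e := hnej i hi
              left; simp only [Int.abs_eq_natAbs]; omega

lemma pvLoop_eq (ex : List Int) : ∀ (ms : List Int) (total : Int), ms.Pairwise (· < ·) →
    (∀ x ∈ ex, x ∉ ms) → pvLoopA ex ms total = pvLoopB ex ms total := by
  induction ex with
  | nil => intro ms total _ _; rfl
  | cons e es ih =>
    intro ms total hs hex
    by_cases hms : ms = []
    · subst hms
      have hA : pvLoopA (e :: es) [] total = pvLoopA es [] total := rfl
      have hB : pvLoopB (e :: es) [] total = pvLoopB es [] total := by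
        simp [pvLoopB, show PySem.List.bisectLeft ([] : List Int) e = 0 from rfl,
          show PySem.List.pop? ([] : List Int) (-1) = none from rfl]
      rw [hA, hB]
      exact ih [] total hs (fun x hx => hex x (by simp [hx]))
    · obtain ⟨N, hN, hNmem⟩ := pvNst_some e ms hms
      have hisN := pvNst_isN e ms N hs (hex e (by simp)) hN
      have hscan := pvScanA_spec e ms N hs (hex e (by simp)) hN
      obtain ⟨j, hj, hidx, hjis⟩ := pvIdx_spec e ms hs (hex e (by simp)) hms
      have hNj : ms[j] = N := pvIsN_unique e ms _ _ hjis hisN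
      have hnd : ms.Nodup := hs.imp ne_of_lt
      have herase : ms.erase N = ms.eraseIdx j := by
        rw [← hNj]
        exact List.erase_eq_eraseIdx_of_idxOf (List.Nodup.idxOf_getElem hnd j hj)
      have hA : pvLoopA (e :: es) ms total = pvLoopA es (ms.erase N) (total + |e - N|) := by
        simp only [pvLoopA, hscan, PySem.List.remove?_eq_some_erase ms N hNmem, Option.getD_some]
      have hB : pvLoopB (e :: es) ms total = pvLoopB es (ms.eraseIdx j) (total + |e - ms[j]|) := by
        simp only [pvLoopB]
        rw [hidx, PySem.List.pop?_natCast ms j hj]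
      rw [hA, hB, herase, hNj]
      exact ih _ _ (List.Pairwise.sublist (List.eraseIdx_sublist ms j) hs)
        (fun x hx hxm => hex x (by simp [hx]) (List.eraseIdx_subset hxm))

lemma pvBuild_fst_mem (n : Int) (l : List Int) : ∀ (st : PySem.Set Int × List Int) (v : Int),
    v ∈ (pvBuild n l st).1 ↔ v ∈ st.1 ∨ (v ∈ l ∧ 1 ≤ v ∧ v ≤ n) := by
  induction l with
  | nil => intro st v; simp [pvBuild]
  | cons x xs ih =>
    intro st v
    by_cases hc : 1 ≤ x ∧ x ≤ n ∧ x ∉ st.1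
    · rw [show pvBuild n (x :: xs) st = pvBuild n xs (PySem.Set.add st.1 x, st.2) from by
        simp [pvBuild, hc]]
      rw [ih (PySem.Set.add st.1 x, st.2) v]
      obtain ⟨h1, h2, _⟩ := hc
      simp only [PySem.Set.mem_add, List.mem_cons]
      by_cases hvx : v = x
      · subst hvx; tauto
      · tauto
    · rw [show pvBuild n (x :: xs) st = pvBuild n xs (st.1, st.2 ++ [x]) from by
        simp [pvBuild, hc]]
      rw [ih (st.1, st.2 ++ [x]) v]
      simp only [List.mem_cons]
      by_cases hvx : v = x
      · subst hvx; tauto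
      · tauto

lemma pvBuild_snd_count (n : Int) (l : List Int) : ∀ (st : PySem.Set Int × List Int) (v : Int),
    (pvBuild n l st).2.count v =
      st.2.count v + (if 1 ≤ v ∧ v ≤ n ∧ v ∉ st.1 ∧ v ∈ l then l.count v - 1 else l.count v) := by
  induction l with
  | nil => intro st v; simp [pvBuild]
  | cons x xs ih =>
    intro st v
    by_cases hc : 1 ≤ x ∧ x ≤ n ∧ x ∉ st.1
    · rw [show pvBuild n (x :: xs) st = pvBuild n xs (PySem.Set.add st.1 x, st.2) from by
        simp [pvBuild, hc]]
      rw [ih (PySem.Set.add st.1 x, st.2) v]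
      dsimp only
      by_cases hvx : v = x
      · subst hvx
        rw [if_neg (fun hh => hh.2.2.1 (by rw [PySem.Set.mem_add]; exact Or.inr rfl)),
          if_pos ⟨hc.1, hc.2.1, hc.2.2, by simp⟩, List.count_cons_self]
        omega
      · have hxv : ¬ x = v := fun hh => hvx hh.symm
        have hmem : (v ∈ PySem.Set.add st.1 x) ↔ v ∈ st.1 := by
          rw [PySem.Set.mem_add, or_iff_left hvx]
        have hcnt : (x :: xs).count v = xs.count v := by simp [hxv]
        rw [hcnt]
        by_cases h1 : 1 ≤ v ∧ v ≤ n ∧ v ∉ st.1 ∧ v ∈ xs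
        · rw [if_pos ⟨h1.1, h1.2.1, fun hh => h1.2.2.1 (hmem.mp hh), h1.2.2.2⟩,
            if_pos ⟨h1.1, h1.2.1, h1.2.2.1, by simp [h1.2.2.2]⟩]
        · rw [if_neg (fun hh => h1 ⟨hh.1, hh.2.1, fun hm => hh.2.2.1 (hmem.mpr hm), hh.2.2.2⟩),
            if_neg (fun hh => h1 ⟨hh.1, hh.2.1, hh.2.2.1, by
              rcases List.mem_cons.mp hh.2.2.2 with h | h
              · exact absurd h hvx
              · exact h⟩)]
    · rw [show pvBuild n (x :: xs) st = pvBuild n xs (st.1, st.2 ++ [x]) from by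
        simp [pvBuild, hc]]
      rw [ih (st.1, st.2 ++ [x]) v]
      dsimp only
      by_cases hvx : v = x
      · subst hvx
        have hnc : ¬ (1 ≤ v ∧ v ≤ n ∧ v ∉ st.1 ∧ v ∈ xs) := fun hh => hc ⟨hh.1, hh.2.1, hh.2.2.1⟩
        have hnc2 : ¬ (1 ≤ v ∧ v ≤ n ∧ v ∉ st.1 ∧ v ∈ v :: xs) := fun hh => hc ⟨hh.1, hh.2.1, hh.2.2.1⟩
        rw [if_neg hnc, if_neg hnc2, List.count_cons_self, List.count_append,
          show List.count v [v] = 1 from by simp]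
        omega
      · have hxv : ¬ x = v := fun hh => hvx hh.symm
        have hcnt : (x :: xs).count v = xs.count v := by simp [hxv]
        have happ : (st.2 ++ [x]).count v = st.2.count v := by
          rw [List.count_append]; simp [hxv]
        rw [hcnt, happ]
        by_cases h1 : 1 ≤ v ∧ v ≤ n ∧ v ∉ st.1 ∧ v ∈ xs
        · rw [if_pos h1, if_pos ⟨h1.1, h1.2.1, h1.2.2.1, by simp [h1.2.2.2]⟩]
        · rw [if_neg h1, if_neg (fun hh => h1 ⟨hh.1, hh.2.1, hh.2.2.1, by
            rcases List.mem_cons.mp hh.2.2.2 with h | h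
            · exact absurd h hvx
            · exact h⟩)]

lemma pvBuild_snd_sorted (n : Int) (l : List Int) : ∀ (st : PySem.Set Int × List Int),
    st.2.Pairwise (· ≤ ·) → (∀ y ∈ st.2, ∀ x ∈ l, y ≤ x) → l.Pairwise (· ≤ ·) →
    (pvBuild n l st).2.Pairwise (· ≤ ·) := by
  induction l with
  | nil => intro st h _ _; simpa [pvBuild] using h
  | cons x xs ih =>
    intro st h hy hl
    have hlp := List.pairwise_cons.mp hl
    by_cases hc : 1 ≤ x ∧ x ≤ n ∧ x ∉ st.1
    · rw [show pvBuild n (x :: xs) st = pvBuild n xs (PySem.Set.add st.1 x, st.2) from by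
        simp [pvBuild, hc]]
      exact ih _ h (fun y hy' z hz => hy y hy' z (by simp [hz])) hlp.2
    · rw [show pvBuild n (x :: xs) st = pvBuild n xs (st.1, st.2 ++ [x]) from by
        simp [pvBuild, hc]]
      apply ih _ ?_ ?_ hlp.2
      · rw [List.pairwise_append]
        refine ⟨h, by simp, ?_⟩
        intro y hy' z hz
        have hzx : z = x := by simpa using hz
        rw [hzx]
        exact hy y hy' x (by simp)
      · intro y hy' z hz
        rcases List.mem_append.mp hy' with hy2 | hy2
        · exact hy y hy2 z (by simp [hz])
        · have hyx : y = x := by simpa using hy2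
          rw [hyx]
          exact hlp.1 z hz

lemma pvEraseFold_count (ws : List Int) : ∀ (xs : List Int) (v : Int), ws.Nodup →
    (ws.foldl (fun ex number => if ex.contains number then (PySem.List.remove? ex number).getD ex else ex) xs).count v
      = if v ∈ ws ∧ v ∈ xs then xs.count v - 1 else xs.count v := by
  induction ws with
  | nil => intro xs v _; simp
  | cons w ws ih =>
    intro xs v hnd
    have hw : w ∉ ws := (List.nodup_cons.mp hnd).1
    have hnd' := (List.nodup_cons.mp hnd).2
    rw [List.foldl_cons]
    by_cases hwx : w ∈ xs
    · have hcontains : xs.contains w = true := by simpa using hwx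
      rw [if_pos hcontains, PySem.List.remove?_eq_some_erase xs w hwx, Option.getD_some,
        ih (xs.erase w) v hnd']
      by_cases hvw : v = w
      · subst hvw
        rw [if_neg (fun hh => hw hh.1), if_pos ⟨by simp, hwx⟩]
        exact List.count_erase_self
      · have h2 : (xs.erase w).count v = xs.count v := List.count_erase_of_ne hvw
        rw [h2]
        by_cases h1 : v ∈ ws ∧ v ∈ xs.erase w
        · rw [if_pos h1, if_pos ⟨List.mem_cons_of_mem w h1.1, (List.mem_erase_of_ne hvw).mp h1.2⟩]
        · rw [if_neg h1, if_neg (fun hh => h1 ⟨by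
            rcases List.mem_cons.mp hh.1 with h | h
            · exact absurd h hvw
            · exact h, (List.mem_erase_of_ne hvw).mpr hh.2⟩)]
    · have hcontains : ¬ (xs.contains w = true) := by simpa using hwx
      rw [if_neg hcontains, ih xs v hnd']
      by_cases h1 : v ∈ ws ∧ v ∈ xs
      · rw [if_pos h1, if_pos ⟨List.mem_cons_of_mem w h1.1, h1.2⟩]
      · rw [if_neg h1, if_neg (fun hh => h1 ⟨by
          rcases List.mem_cons.mp hh.1 with h | h
          · exact absurd (h ▸ hh.2) hwx
          · exact h, hh.2⟩)]

lemma pvEraseFold_sorted (ws : List Int) : ∀ (xs : List Int), xs.Pairwise (· ≤ ·) →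
    (ws.foldl (fun ex number => if ex.contains number then (PySem.List.remove? ex number).getD ex else ex) xs).Pairwise (· ≤ ·) := by
  induction ws with
  | nil => intro xs h; simpa
  | cons w ws ih =>
    intro xs h
    rw [List.foldl_cons]
    apply ih
    by_cases hwx : w ∈ xs
    · have hcontains : xs.contains w = true := by simpa using hwx
      rw [if_pos hcontains, PySem.List.remove?_eq_some_erase xs w hwx, Option.getD_some]
      exact List.Pairwise.sublist List.erase_sublist h
    · have hcontains : ¬ (xs.contains w = true) := by simpa using hwx
      rw [if_neg hcontains]
      exact h

-- ===== VERDICT (by name: the statement is the Claim_ definition above) =====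
theorem min_operations_to_make_permutation_spec : Claim_equal_min_operations_to_make_permutation := by
  intro arr _
  show pvLoopA
      ((PySem.Set.ofList (PySem.List.pyRange 1 ((arr.length : Int) + 1))).foldl
        (fun ex number => if ex.contains number then (PySem.List.remove? ex number).getD ex else ex)
        (PySem.List.sorted arr (fun x => x)))
      (PySem.List.sorted
        (PySem.Set.diff (PySem.Set.ofList (PySem.List.pyRange 1 ((arr.length : Int) + 1)))
          (PySem.Set.ofList arr)) (fun x => x)) 0
    = pvLoopB
      (pvBuild (arr.length : Int) (PySem.List.sorted arr (fun x => x)) (PySem.Set.empty, [])).2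
      ((PySem.List.pyRange 1 ((arr.length : Int) + 1)).filter
        (fun v => !(PySem.Set.contains
          (pvBuild (arr.length : Int) (PySem.List.sorted arr (fun x => x)) (PySem.Set.empty, [])).1 v))) 0
  set n : Int := (arr.length : Int) with hn
  set R : List Int := PySem.List.pyRange 1 (n + 1) with hR
  set sA : List Int := PySem.List.sorted arr (fun x => x) with hsA
  set st : PySem.Set Int × List Int := pvBuild n sA (PySem.Set.empty, []) with hst
  have hexp : PySem.Set.ofList R = R :=
    PySem.Set.ofList_eq_self_of_nodup R (PySem.List.nodup_pyRange_one 1 (n + 1))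
  have hmemsA : ∀ v : Int, v ∈ sA ↔ v ∈ arr := fun v => PySem.List.mem_sorted arr _ _ v
  have hst1 : ∀ v : Int, v ∈ st.1 ↔ v ∈ arr ∧ 1 ≤ v ∧ v ≤ n := by
    intro v
    rw [hst, pvBuild_fst_mem n sA (PySem.Set.empty, []) v]
    dsimp only
    simp only [PySem.Set.empty, List.not_mem_nil, false_or, hmemsA v]
  -- the two 'missing' lists coincide
  have hmiss : PySem.List.sorted (PySem.Set.diff (PySem.Set.ofList R) (PySem.Set.ofList arr)) (fun x => x)
      = R.filter (fun v => !(PySem.Set.contains st.1 v)) := by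
    rw [hexp]
    have hpw : (PySem.Set.diff R (PySem.Set.ofList arr)).Pairwise (· < ·) :=
      List.Pairwise.filter _ (PySem.List.pairwise_lt_pyRange_one 1 (n + 1))
    rw [PySem.List.sorted_eq_self_of_pairwise _ _ (hpw.imp le_of_lt)]
    apply List.filter_congr
    intro v hv
    have hvR := PySem.List.mem_pyRange_one.mp hv
    have hb : (PySem.Set.ofList arr).contains v = PySem.Set.contains st.1 v := by
      rw [Bool.eq_iff_iff, PySem.Set.contains_iff, PySem.Set.contains_iff,
        PySem.Set.mem_ofList, hst1 v]
      constructor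
      · intro h; exact ⟨h, by omega, by omega⟩
      · intro h; exact h.1
    simp only [hb]
  -- the 'exceeding' and 'extra' lists coincide
  have hexc : (PySem.Set.ofList R).foldl
      (fun ex number => if ex.contains number then (PySem.List.remove? ex number).getD ex else ex) sA
      = st.2 := by
    rw [hexp]
    apply PySem.List.eq_of_perm_of_pairwise_le_of_injective (fun x : Int => x) (fun a b h => h)
    · rw [List.perm_iff_count]
      intro v
      rw [pvEraseFold_count R sA v (PySem.List.nodup_pyRange_one 1 (n + 1)),
        hst, pvBuild_snd_count n sA (PySem.Set.empty, []) v]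
      dsimp only
      simp only [List.count_nil, Nat.zero_add]
      by_cases hcnd : v ∈ R ∧ v ∈ sA
      · have hb := PySem.List.mem_pyRange_one.mp (hR ▸ hcnd.1)
        rw [if_pos hcnd, if_pos ⟨hb.1, by omega, by simp [PySem.Set.empty], hcnd.2⟩]
      · rw [if_neg hcnd, if_neg (fun hh => hcnd
          ⟨hR ▸ PySem.List.mem_pyRange_one.mpr ⟨hh.1, by omega⟩, hh.2.2.2⟩)]
    · exact pvEraseFold_sorted R sA (PySem.List.sorted_pairwise arr (fun x => x))
    · rw [hst]
      exact pvBuild_snd_sorted n sA (PySem.Set.empty, []) (by simp) (by simp)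
        (PySem.List.sorted_pairwise arr (fun x => x))
  rw [hmiss, hexc]
  apply pvLoop_eq
  · exact List.Pairwise.filter _ (PySem.List.pairwise_lt_pyRange_one 1 (n + 1))
  · intro x hx hxm
    have hxarr : x ∈ arr := by
      have hcnt := pvBuild_snd_count n sA (PySem.Set.empty, []) x
      rw [← hst] at hcnt
      dsimp only at hcnt
      simp only [List.count_nil, Nat.zero_add] at hcnt
      have hpos : 0 < st.2.count x := List.count_pos_iff.mpr hx
      have hcount : 0 < sA.count x := by
        by_cases hc : 1 ≤ x ∧ x ≤ n ∧ x ∉ (PySem.Set.empty : PySem.Set Int) ∧ x ∈ sA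
        · rw [if_pos hc] at hcnt; omega
        · rw [if_neg hc] at hcnt; omega
      exact (hmemsA x).mp (List.count_pos_iff.mp hcount)
    have hmf := List.mem_filter.mp hxm
    have hxR := PySem.List.mem_pyRange_one.mp hmf.1
    have hcontf : PySem.Set.contains st.1 x = false := by
      have := hmf.2
      cases hh : PySem.Set.contains st.1 x
      · rfl
      · rw [hh] at this; simp at this
    have hnotin : x ∉ st.1 := by
      intro hin
      rw [(PySem.Set.contains_iff st.1 x).mpr hin] at hcontf
      exact Bool.noConfusion hcontf
    exact hnotin ((hst1 x).mpr ⟨hxarr, by omega, by omega⟩)
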